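-- pv_equiv track=rewrite | github.com/Anthorusse75/Saving_Private_Tikana_Bot | Bot_main_old.py | generate_prefix
-- ===== SOURCE A (Python) =====
-- def generate_prefix(name: str, existing_prefixes: list) -> str:
--     words = name.split()
--     initials = "".join([w[0].upper() for w in words if w])
--     if len(initials) >= 3:
--         prefix = initials[:3]
--     else:
--         prefix = initials.ljust(3, 'X')
--     if prefix not in existing_prefixes:
--         return prefix
--     base = prefix[:2]
--     for digit in range(1, 10):
--         new_prefix = f"{base}{digit}"
--         if new_prefix not in existing_prefixes:
--             return new_prefix
--     return prefix + "0"
-- ===== SOURCE B (Python) =====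
-- def generate_prefix(name: str, existing_prefixes: list) -> str:
--     prefix = ("".join(w[:1] for w in name.split()) + "xxx").upper()[:3]
--     base = prefix[:2]
--     prefix_taken = False
--     taken_digits = set()
--     for e in existing_prefixes:
--         if e == prefix:
--             prefix_taken = True
--         if len(e) == 3 and e[:2] == base and '1' <= e[2] <= '9':
--             taken_digits.add(ord(e[2]) - 48)
--     if not prefix_taken:
--         return prefix
--     for d in range(1, 10):
--         if d not in taken_digits:
--             return base + str(d)
--     return prefix + "0"
-- ===== Notes on version B (the rewrite author's own statement) =====
-- stated objective: alternative
-- what changed: B inverts the traversal: instead of A's up-to-10 separate membership scans of existing_prefixes (prefix, then base+'1'..base+'9' in turn), B makes ONE pass over existing_prefixes classifying each entry (is it the prefix? is it base plus a digit 1-9?) into a flag and a set of taken digits, then picks the first free candidate arithmetically.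
import Mathlib
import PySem

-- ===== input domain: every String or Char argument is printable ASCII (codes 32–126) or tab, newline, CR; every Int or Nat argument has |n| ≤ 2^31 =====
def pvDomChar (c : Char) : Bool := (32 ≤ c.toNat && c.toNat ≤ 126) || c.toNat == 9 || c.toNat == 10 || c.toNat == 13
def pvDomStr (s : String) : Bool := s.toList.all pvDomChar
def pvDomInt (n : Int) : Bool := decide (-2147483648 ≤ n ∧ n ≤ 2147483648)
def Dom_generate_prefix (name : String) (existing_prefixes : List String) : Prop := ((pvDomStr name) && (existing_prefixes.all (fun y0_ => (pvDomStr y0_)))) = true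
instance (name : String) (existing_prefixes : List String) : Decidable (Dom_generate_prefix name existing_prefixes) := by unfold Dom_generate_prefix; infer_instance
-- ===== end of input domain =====

-- B inverts the traversal: one pass over existing_prefixes records whether the prefix is taken
-- and which digit variants base+'1'..base+'9' are taken (a set), then picks the answer, instead
-- of A's up-to-10 separate membership scans of the list (alternative decomposition).


-- ===== PORT A =====
/-- `w[0].upper()` for one word of the comprehension; `pyGet? _ 0 = none` (IndexError)
    is unreachable because the comprehension keeps only non-empty words. -/
def pvA_initial (w : List Char) : List Char :=
  (PySem.List.pyGet? w 0).elim [] (fun c => [PySem.Chars.upperChar c])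

/-- the `for digit in range(1, 10)` loop with its early return -/
def pvA_digits (base : List Char) (existing_prefixes : List String) : List Int → Option String
  | [] => none
  | d :: rest =>
    let new_prefix := String.ofList (base ++ (PySem.Int.toStr d).toList)
    if new_prefix ∉ existing_prefixes then some new_prefix
    else pvA_digits base existing_prefixes rest

def generate_prefix (name : String) (existing_prefixes : List String) : String :=
  let words := PySem.Str.split₀ name
  let initials : List Char :=
    PySem.Chars.join [] (((words.map String.toList).filter (fun w => w ≠ [])).map pvA_initial)
  let prefix_ : List Char :=
    if 3 ≤ initials.length then PySem.List.slice initials none (some 3)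
    else initials ++ List.replicate (3 - initials.length) 'X'   -- `initials.ljust(3, 'X')`, ported by hand (exact)
  if String.ofList prefix_ ∉ existing_prefixes then String.ofList prefix_
  else
    let base := PySem.List.slice prefix_ none (some 2)
    match pvA_digits base existing_prefixes (PySem.List.pyRange 1 10 1) with
    | some s => s
    | none => String.ofList (prefix_ ++ ['0'])

-- ===== PORT B =====
/-- the `if len(e) == 3 and e[:2] == base and '1' <= e[2] <= '9': taken_digits.add(ord(e[2]) - 48)`
    classification of one existing entry; the length-3 test plus the two indexings are the
    pattern match (exact: both sides inspect the same three characters). -/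
def pvB_classify (base : List Char) (td : PySem.Set Int) (e : String) : PySem.Set Int :=
  match e.toList with
  | [c0, c1, c2] =>
    if [c0, c1] = base ∧ '1' ≤ c2 ∧ c2 ≤ '9' then PySem.Set.add td ((c2.toNat : Int) - 48)
    else td
  | _ => td

/-- one iteration of B's single pass over `existing_prefixes` -/
def pvB_step (prefix_ : String) (base : List Char) (st : Bool × PySem.Set Int) (e : String) :
    Bool × PySem.Set Int :=
  ((if e = prefix_ then true else st.1), pvB_classify base st.2 e)

/-- the `for d in range(1, 10): if d not in taken_digits: return base + str(d)` loop -/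
def pvB_pick (base : List Char) (td : PySem.Set Int) : List Int → Option String
  | [] => none
  | d :: rest =>
    if d ∉ td then some (String.ofList (base ++ (PySem.Int.toStr d).toList))
    else pvB_pick base td rest

def generate_prefix_alt (name : String) (existing_prefixes : List String) : String :=
  let prefix_ : List Char :=
    PySem.List.slice
      (PySem.Chars.upper
        (PySem.Chars.join []
            ((PySem.Str.split₀ name).map (fun w => PySem.List.slice w.toList none (some 1)))
          ++ "xxx".toList))
      none (some 3)
  let base := PySem.List.slice prefix_ none (some 2)
  let st := existing_prefixes.foldl (pvB_step (String.ofList prefix_) base) (false, PySem.Set.empty)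
  if st.1 = false then String.ofList prefix_
  else
    match pvB_pick base st.2 (PySem.List.pyRange 1 10 1) with
    | some s => s
    | none => String.ofList (prefix_ ++ ['0'])

-- ===== PRECONDITION & SPEC =====
def Spec_generate_prefix (name : String) (existing_prefixes : List String) (out : String) : Prop := out = generate_prefix_alt name existing_prefixes
instance (name : String) (existing_prefixes : List String) (out : String) : Decidable (Spec_generate_prefix name existing_prefixes out) := by unfold Spec_generate_prefix; infer_instance

-- ===== CLAIM (what is proved, stated in full; the proofs are below) =====
def Claim_equal_generate_prefix : Prop := ∀ (name : String) (existing_prefixes : List String), Dom_generate_prefix name existing_prefixes → Spec_generate_prefix name existing_prefixes (generate_prefix name existing_prefixes)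

-- ===== LEMMAS AND PROOFS =====
lemma char_toNat_inj {a b : Char} (h : a.toNat = b.toNat) : a = b :=
  Char.ext (UInt32.toNat_inj.mp h)

lemma join_nil_flatten (ps : List (List Char)) : PySem.Chars.join [] ps = ps.flatten := by
  unfold PySem.Chars.join
  induction ps with
  | nil => rfl
  | cons h t ih => cases t <;> simp_all [List.intercalate, List.intersperse]

/-- A's per-word initial over the filtered words equals upper-casing B's joined `w[:1]` pieces. -/
lemma initials_eq (ws : List (List Char)) :
    ((ws.filter (fun w => w ≠ [])).map pvA_initial).flatten
      = PySem.Chars.upper ((ws.map (fun w => PySem.List.slice w none (some 1))).flatten) := by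
  induction ws with
  | nil => simp [PySem.Chars.upper]
  | cons w rest ih =>
    cases w with
    | nil => simpa [PySem.Chars.upper, PySem.List.slice] using ih
    | cons c cs =>
      have h1 : PySem.List.slice (c :: cs) none (some 1) = [c] := by
        simp [PySem.List.slice]
      have h2 : pvA_initial (c :: cs) = [PySem.Chars.upperChar c] := by
        simp [pvA_initial, PySem.List.pyGet?, PySem.List.pyIdx?]
      simp only [List.filter_cons, decide_not, List.map_cons, List.flatten_cons,
        PySem.Chars.upper, List.map_append] at *
      simp [h1, h2, ih]

/-- B's pad-with-"XXX"-then-truncate equals A's two-branch `ljust` computation. -/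
lemma prefix_eq (J : List Char) :
    PySem.List.slice (J ++ "xxx".toList.map PySem.Chars.upperChar) none (some 3)
      = (if 3 ≤ J.length
          then PySem.List.slice J none (some 3)
          else J ++ List.replicate (3 - J.length) 'X') := by
  have h3 : ("xxx".toList.map PySem.Chars.upperChar) = List.replicate 3 'X' := by decide
  rw [h3]
  rw [show (some (3:Int)) = some ((3:Nat):Int) by norm_num,
    PySem.List.slice_to_natCast, PySem.List.slice_to_natCast]
  by_cases h : 3 ≤ J.length
  · simp [List.take_append_of_le_length h, h]
  · rw [List.take_append]
    simp only [h, if_false]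
    have ht : List.take 3 J = J := List.take_of_length_le (by omega)
    rw [ht, List.take_replicate]
    have hm : min (3 - J.length) 3 = 3 - J.length := by omega
    rw [hm]

/-- what one classification step can put into the digit set -/
lemma mem_classify (base : List Char) (td : PySem.Set Int) (e : String) (x : Int) :
    x ∈ pvB_classify base td e
      ↔ x ∈ td ∨ (∃ c0 c1 c2, e.toList = [c0, c1, c2] ∧ [c0, c1] = base ∧
          '1' ≤ c2 ∧ c2 ≤ '9' ∧ x = (c2.toNat : Int) - 48) := by
  unfold pvB_classify
  split
  · rename_i c0 c1 c2 hsh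
    split_ifs with hcond
    · rw [PySem.Set.mem_add]
      constructor
      · rintro (hx | hx)
        · exact Or.inl hx
        · exact Or.inr ⟨c0, c1, c2, hsh, hcond.1, hcond.2.1, hcond.2.2, hx⟩
      · rintro (hx | ⟨d0, d1, d2, hsh', hb, h1, h9, hx⟩)
        · exact Or.inl hx
        · rw [hsh'] at hsh
          cases hsh; exact Or.inr hx
    · constructor
      · exact Or.inl
      · rintro (hx | ⟨d0, d1, d2, hsh', hb, h1, h9, hx⟩)
        · exact hx
        · rw [hsh'] at hsh
          cases hsh; exact absurd ⟨hb, h1, h9⟩ hcond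
  · rename_i hno
    constructor
    · exact Or.inl
    · rintro (hx | ⟨d0, d1, d2, hsh', _, _, _, _⟩)
      · exact hx
      · exact absurd hsh' (hno d0 d1 d2)

/-- invariant of B's single pass: the flag records membership of the prefix, the set records
    exactly the taken digit variants. -/
lemma fold_inv (p : String) (base : List Char) (ex : List String) (st : Bool × PySem.Set Int) :
    (ex.foldl (pvB_step p base) st).1 = (st.1 || decide (p ∈ ex))
    ∧ ∀ x, x ∈ (ex.foldl (pvB_step p base) st).2
        ↔ x ∈ st.2 ∨ (∃ e ∈ ex, ∃ c0 c1 c2, e.toList = [c0, c1, c2] ∧ [c0, c1] = base ∧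
            '1' ≤ c2 ∧ c2 ≤ '9' ∧ x = (c2.toNat : Int) - 48) := by
  induction ex generalizing st with
  | nil => simp
  | cons e rest ih =>
    simp only [List.foldl_cons]
    obtain ⟨ih1, ih2⟩ := ih (pvB_step p base st e)
    constructor
    · rw [ih1]
      simp only [pvB_step]
      by_cases he : e = p
      · have hm : p ∈ e :: rest := by rw [he]; exact List.mem_cons_self ..
        simp [he, hm]
      · have hiff : (p ∈ e :: rest) ↔ (p ∈ rest) := by
          constructor
          · intro h
            rcases List.mem_cons.mp h with h' | h'
            · exact absurd h'.symm he
            · exact h'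
          · exact List.mem_cons_of_mem _
        simp [he, hiff]
    · intro x
      rw [ih2 x, show (pvB_step p base st e).2 = pvB_classify base st.2 e from rfl, mem_classify]
      constructor
      · rintro ((hx | ⟨c0, c1, c2, h⟩) | ⟨f, hf, hmatch⟩)
        · exact Or.inl hx
        · exact Or.inr ⟨e, List.mem_cons_self .., c0, c1, c2, h⟩
        · exact Or.inr ⟨f, List.mem_cons_of_mem _ hf, hmatch⟩
      · rintro (hx | ⟨f, hf, hmatch⟩)
        · exact Or.inl (Or.inl hx)
        · rcases List.mem_cons.mp hf with rfl | hf'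
          · exact Or.inl (Or.inr hmatch)
          · exact Or.inr ⟨f, hf', hmatch⟩

/-- membership of digit `d` in B's accumulated set is membership of `base + str(d)` in the list -/
lemma digit_mem (q : String) (b0 b1 : Char) (ex : List String) (d : Int) (c : Char)
    (hc : (PySem.Int.toStr d).toList = [c]) (h1 : '1' ≤ c) (h9 : c ≤ '9')
    (hd : (c.toNat : Int) - 48 = d) :
    d ∈ (ex.foldl (pvB_step q [b0, b1]) (false, PySem.Set.empty)).2
      ↔ String.ofList ([b0, b1] ++ (PySem.Int.toStr d).toList) ∈ ex := by
  rw [(fold_inv q [b0, b1] ex (false, PySem.Set.empty)).2 d, hc]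
  constructor
  · rintro (hx | ⟨e, he, c0, c1, c2, hsh, hb, hc1, hc9, hx⟩)
    · simp [PySem.Set.empty] at hx
    · obtain ⟨rfl, rfl⟩ : c0 = b0 ∧ c1 = b1 := by
        injection hb with h1 h2; injection h2 with h2 _; exact ⟨h1, h2⟩
      have hcc : c2 = c := char_toNat_inj (by omega)
      subst hcc
      have hcat : ([c0, c1] ++ [c2] : List Char) = [c0, c1, c2] := rfl
      rw [hcat, ← hsh, String.ofList_toList]
      exact he
  · intro hmem
    refine Or.inr ⟨String.ofList ([b0, b1] ++ [c]), hmem, b0, b1, c, ?_, rfl, h1, h9, by omega⟩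
    rw [String.toList_ofList]; rfl

/-- A's early-return digit loop equals B's pick over the accumulated set,
    given the per-digit membership correspondence. -/
lemma loop_eq (base : List Char) (td : PySem.Set Int) (ex : List String) (ds : List Int)
    (h : ∀ d ∈ ds, (d ∈ td ↔ String.ofList (base ++ (PySem.Int.toStr d).toList) ∈ ex)) :
    pvA_digits base ex ds = pvB_pick base td ds := by
  induction ds with
  | nil => rfl
  | cons d rest ih =>
    have hd := h d (List.mem_cons_self ..)
    simp only [pvA_digits, pvB_pick]
    by_cases hmem : d ∈ td
    · rw [if_neg (by simpa using hd.mp hmem), if_neg (by simpa using hmem)]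
      exact ih (fun x hx => h x (List.mem_cons_of_mem _ hx))
    · rw [if_pos (fun hx => hmem (hd.mpr hx)), if_pos hmem]

/-- A's branch-plus-loop tail equals B's single-pass-then-pick tail on a length-3 prefix. -/
lemma tail_eq (b0 b1 b2 : Char) (ex : List String) :
    (if String.ofList [b0, b1, b2] ∉ ex then String.ofList [b0, b1, b2]
     else
       match pvA_digits (PySem.List.slice [b0, b1, b2] none (some 2)) ex (PySem.List.pyRange 1 10 1) with
       | some s => s
       | none => String.ofList ([b0, b1, b2] ++ ['0']))
    = (let base := PySem.List.slice [b0, b1, b2] none (some 2)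
       let st := ex.foldl (pvB_step (String.ofList [b0, b1, b2]) base) (false, PySem.Set.empty)
       if st.1 = false then String.ofList [b0, b1, b2]
       else
         match pvB_pick base st.2 (PySem.List.pyRange 1 10 1) with
         | some s => s
         | none => String.ofList ([b0, b1, b2] ++ ['0'])) := by
  have hbase : PySem.List.slice ([b0, b1, b2] : List Char) none (some 2) = [b0, b1] := by
    rw [show (some (2 : Int)) = some ((2 : Nat) : Int) by norm_num, PySem.List.slice_to_natCast]
    rfl
  have hflag := (fold_inv (String.ofList [b0, b1, b2]) [b0, b1] ex (false, PySem.Set.empty)).1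
  simp only [hbase]
  by_cases hmem : String.ofList [b0, b1, b2] ∈ ex
  · rw [if_neg (by simpa using hmem)]
    have hf : (ex.foldl (pvB_step (String.ofList [b0, b1, b2]) [b0, b1]) (false, PySem.Set.empty)).1 = true := by
      rw [hflag]; simp [hmem]
    have hne : ¬ ((ex.foldl (pvB_step (String.ofList [b0, b1, b2]) [b0, b1]) (false, PySem.Set.empty)).1 = false) := by
      rw [hf]; decide
    rw [if_neg hne]
    have hr : PySem.List.pyRange 1 10 1 = [1, 2, 3, 4, 5, 6, 7, 8, 9] := by decide
    have hds : ∀ d ∈ PySem.List.pyRange 1 10 1,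
        (d ∈ (ex.foldl (pvB_step (String.ofList [b0, b1, b2]) [b0, b1]) (false, PySem.Set.empty)).2
          ↔ String.ofList ([b0, b1] ++ (PySem.Int.toStr d).toList) ∈ ex) := by
      intro d hdmem
      rw [hr] at hdmem
      fin_cases hdmem
      · exact digit_mem _ b0 b1 ex 1 '1' (by decide) (by decide) (by decide) (by decide)
      · exact digit_mem _ b0 b1 ex 2 '2' (by decide) (by decide) (by decide) (by decide)
      · exact digit_mem _ b0 b1 ex 3 '3' (by decide) (by decide) (by decide) (by decide)
      · exact digit_mem _ b0 b1 ex 4 '4' (by decide) (by decide) (by decide) (by decide)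
      · exact digit_mem _ b0 b1 ex 5 '5' (by decide) (by decide) (by decide) (by decide)
      · exact digit_mem _ b0 b1 ex 6 '6' (by decide) (by decide) (by decide) (by decide)
      · exact digit_mem _ b0 b1 ex 7 '7' (by decide) (by decide) (by decide) (by decide)
      · exact digit_mem _ b0 b1 ex 8 '8' (by decide) (by decide) (by decide) (by decide)
      · exact digit_mem _ b0 b1 ex 9 '9' (by decide) (by decide) (by decide) (by decide)
    rw [loop_eq [b0, b1] _ ex _ hds]
  · rw [if_pos hmem]
    have hf : (ex.foldl (pvB_step (String.ofList [b0, b1, b2]) [b0, b1]) (false, PySem.Set.empty)).1 = false := by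
      rw [hflag]; simp [hmem]
    rw [if_pos hf]

lemma ports_eq (name : String) (ex : List String) :
    generate_prefix name ex = generate_prefix_alt name ex := by
  have hA : generate_prefix name ex =
      (let initials : List Char :=
        PySem.Chars.join [] ((((PySem.Str.split₀ name).map String.toList).filter (fun w => w ≠ [])).map pvA_initial)
       let prefix_ : List Char :=
        if 3 ≤ initials.length then PySem.List.slice initials none (some 3)
        else initials ++ List.replicate (3 - initials.length) 'X'
       if String.ofList prefix_ ∉ ex then String.ofList prefix_
       else
        match pvA_digits (PySem.List.slice prefix_ none (some 2)) ex (PySem.List.pyRange 1 10 1) with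
        | some s => s
        | none => String.ofList (prefix_ ++ ['0'])) := rfl
  have hB : generate_prefix_alt name ex =
      (let prefix_ : List Char :=
        PySem.List.slice
          (PySem.Chars.upper
            (PySem.Chars.join [] ((PySem.Str.split₀ name).map (fun w => PySem.List.slice w.toList none (some 1)))
              ++ "xxx".toList)) none (some 3)
       let base := PySem.List.slice prefix_ none (some 2)
       let st := ex.foldl (pvB_step (String.ofList prefix_) base) (false, PySem.Set.empty)
       if st.1 = false then String.ofList prefix_
       else
         match pvB_pick base st.2 (PySem.List.pyRange 1 10 1) with
         | some s => s
         | none => String.ofList (prefix_ ++ ['0'])) := rfl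
  rw [hA, hB]
  show _ = _
  simp only []
  rw [show (PySem.Str.split₀ name).map (fun w => PySem.List.slice w.toList none (some 1))
        = ((PySem.Str.split₀ name).map String.toList).map (fun w => PySem.List.slice w none (some 1)) by
      rw [List.map_map]; rfl]
  rw [join_nil_flatten, join_nil_flatten]
  rw [show PySem.Chars.upper
        ((((PySem.Str.split₀ name).map String.toList).map (fun w => PySem.List.slice w none (some 1))).flatten
          ++ "xxx".toList)
      = PySem.Chars.upper
          (((PySem.Str.split₀ name).map String.toList).map (fun w => PySem.List.slice w none (some 1))).flatten
        ++ "xxx".toList.map PySem.Chars.upperChar by simp [PySem.Chars.upper]]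
  rw [prefix_eq, ← initials_eq]
  generalize hP : (if 3 ≤ ((((PySem.Str.split₀ name).map String.toList).filter (fun w => w ≠ [])).map pvA_initial).flatten.length
      then PySem.List.slice ((((PySem.Str.split₀ name).map String.toList).filter (fun w => w ≠ [])).map pvA_initial).flatten none (some 3)
      else ((((PySem.Str.split₀ name).map String.toList).filter (fun w => w ≠ [])).map pvA_initial).flatten
        ++ List.replicate (3 - ((((PySem.Str.split₀ name).map String.toList).filter (fun w => w ≠ [])).map pvA_initial).flatten.length) 'X') = p
  have hlen : p.length = 3 := by
    rw [← hP]
    split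
    · rename_i h
      rw [show (some (3 : Int)) = some ((3 : Nat) : Int) by norm_num, PySem.List.slice_to_natCast,
        List.length_take]
      omega
    · rename_i h
      rw [List.length_append, List.length_replicate]
      omega
  obtain ⟨b0, b1, b2, rfl⟩ := List.length_eq_three.mp hlen
  exact tail_eq b0 b1 b2 ex

-- ===== VERDICT (by name: the statement is the Claim_ definition above) =====
theorem generate_prefix_spec : Claim_equal_generate_prefix := by
  intro name ex _
  exact ports_eq name ex
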